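-- pv_equiv track=rewrite | github.com/yuanyue-liu-group/EDI | surface_scattering/slabcond.py | get_dfrmat
-- ===== SOURCE A (Python) =====
-- def get_dfrmat(kzl): # created by genius ChatGPT
--     # Sort kzl while keeping track of the original indices
--     sorted_indices = sorted(range(len(kzl)), key=lambda k: kzl[k])
--
--     # Initialize an empty matrix with zeros
--     n = len(kzl)
--     rmat = [[0] * n for _ in range(n)]
--
--     # Create the pairs of lowest-highest, second-lowest-second-highest, etc.
--     pairs = [(sorted_indices[i], sorted_indices[~i]) for i in range(n//2)]
--
--     # If the length of kzl is odd, add the middle element to the pairs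
--     if n % 2 == 1:
--         middle_index = sorted_indices[n // 2]
--         pairs.append((middle_index, middle_index))
--
--     # Check the pairs to determine which matrix elements should be set to 1
--     for pair in pairs:
--         rmat[pair[0]][pair[1]] = 1
--         rmat[pair[1]][pair[0]] = 1
--
--     return rmat
-- ===== SOURCE B (Python) =====
-- def get_dfrmat(kzl):
--     n = len(kzl)
--     # stable rank of index j: how many indices come strictly before j when
--     # sorting by value with ties broken by original position
--     rank = [sum(1 for i in range(n)
--                 if kzl[i] < kzl[j] or (kzl[i] == kzl[j] and i < j))
--             for j in range(n)]
--     # invert the rank permutation: inv[r] = the index of rank r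
--     inv = [0] * n
--     for j in range(n):
--         inv[rank[j]] = j
--     # row j has a single 1, in the column of the index with the mirror rank
--     return [[1 if c == inv[n - 1 - rank[j]] else 0 for c in range(n)]
--             for j in range(n)]
-- ===== Notes on version B (the rewrite author's own statement) =====
-- stated objective: alternative
-- what changed: Replaced the sort-then-pair construction (sorted index list, half-length pairs list with an n%2 middle case, symmetric in-place writes) by a sort-free one: each index's stable rank is computed by comparison counting, the rank permutation is inverted into an array, and the matrix is built functionally with one indicator comprehension per row.
import Mathlib
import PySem

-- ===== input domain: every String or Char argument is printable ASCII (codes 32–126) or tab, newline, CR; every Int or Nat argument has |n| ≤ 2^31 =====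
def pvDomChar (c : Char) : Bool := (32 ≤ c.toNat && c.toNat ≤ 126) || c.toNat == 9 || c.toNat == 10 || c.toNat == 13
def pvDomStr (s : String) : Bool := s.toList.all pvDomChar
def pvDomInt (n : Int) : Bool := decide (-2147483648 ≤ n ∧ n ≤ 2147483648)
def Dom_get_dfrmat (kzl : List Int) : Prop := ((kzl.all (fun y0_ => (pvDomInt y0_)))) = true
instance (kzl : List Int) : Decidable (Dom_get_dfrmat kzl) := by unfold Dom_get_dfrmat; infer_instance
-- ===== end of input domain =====

-- B drops the sort and the pairs list entirely: it computes each index's stable rank by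
-- comparison counting, inverts the rank permutation, and builds the matrix by comprehension.

-- helper for port A: the Python statement `rmat[r][c] = 1`
-- (read row r, set its c-th entry to 1, store the row back)
def pvSetE (m : List (List Int)) (r c : Nat) : List (List Int) :=
  m.set r ((m.getD r []).set c 1)

-- ===== PORT A =====
def get_dfrmat (kzl : List Int) : List (List Int) :=
  let n := kzl.length
  -- sorted(range(len(kzl)), key=lambda k: kzl[k]); kzl[k] is in range, so getD is exact
  let sorted_indices := PySem.List.sorted (List.range n) (fun k => kzl.getD k 0) false
  let rmat := (List.range n).map (fun _ => List.replicate n (0 : Int))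
  -- sorted_indices[~i] is the element at index n-1-i (negative index, always in range here)
  let pairs0 := (List.range (n / 2)).map
      (fun i => (sorted_indices.getD i 0, sorted_indices.getD (n - 1 - i) 0))
  let pairs := if n % 2 = 1 then
      pairs0 ++ [(sorted_indices.getD (n / 2) 0, sorted_indices.getD (n / 2) 0)]
    else pairs0
  pairs.foldl (fun m p => pvSetE (pvSetE m p.1 p.2) p.2 p.1) rmat

-- ===== PORT B =====
def get_dfrmat_alt (kzl : List Int) : List (List Int) :=
  let n := kzl.length
  -- rank[j] = sum(1 for i in range(n) if kzl[i] < kzl[j] or (kzl[i] == kzl[j] and i < j))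
  let rank := (List.range n).map (fun j =>
    (List.range n).countP (fun i =>
      decide (kzl.getD i 0 < kzl.getD j 0) ||
      (kzl.getD i 0 == kzl.getD j 0 && decide (i < j))))
  -- inv[rank[j]] = j
  let inv := (List.range n).foldl (fun p j => p.set (rank.getD j 0) j)
      (List.replicate n (0 : Nat))
  -- [[1 if c == inv[n - 1 - rank[j]] else 0 for c in range(n)] for j in range(n)]
  (List.range n).map (fun j =>
    (List.range n).map (fun c =>
      if c = inv.getD (n - 1 - rank.getD j 0) 0 then (1 : Int) else 0))

-- ===== PRECONDITION & SPEC =====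
def Spec_get_dfrmat (kzl : List Int) (out : List (List Int)) : Prop := out = get_dfrmat_alt kzl
instance (kzl : List Int) (out : List (List Int)) : Decidable (Spec_get_dfrmat kzl out) := by unfold Spec_get_dfrmat; infer_instance

-- ===== CLAIM (what is proved, stated in full; the proofs are below) =====
def Claim_equal_get_dfrmat : Prop := ∀ (kzl : List Int), Dom_get_dfrmat kzl → Spec_get_dfrmat kzl (get_dfrmat kzl)

-- ===== LEMMAS AND PROOFS =====

-- abbreviations (definitionally equal to the ports' subterms)
def pvS (kzl : List Int) : List Nat :=
  PySem.List.sorted (List.range kzl.length) (fun k => kzl.getD k 0) false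

def pvLexB (kzl : List Int) (i j : Nat) : Bool :=
  decide (kzl.getD i 0 < kzl.getD j 0) ||
    (kzl.getD i 0 == kzl.getD j 0 && decide (i < j))

def pvLex (kzl : List Int) (i j : Nat) : Prop :=
  kzl.getD i 0 < kzl.getD j 0 ∨ (kzl.getD i 0 = kzl.getD j 0 ∧ i < j)

def pvRankN (kzl : List Int) (j : Nat) : Nat :=
  (List.range kzl.length).countP (fun i => pvLexB kzl i j)

def pvShape (n : Nat) (m : List (List Int)) : Prop :=
  m.length = n ∧ ∀ row ∈ m, row.length = n

def pvGet (m : List (List Int)) (a b : Nat) : Int := (m.getD a []).getD b 0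

lemma pvLexB_iff (kzl : List Int) (i j : Nat) : pvLexB kzl i j = true ↔ pvLex kzl i j := by
  simp [pvLexB, pvLex]

lemma pvLex_irrefl (kzl : List Int) (i : Nat) : ¬ pvLex kzl i i := by
  simp [pvLex]

lemma pvLex_asymm (kzl : List Int) (i j : Nat) (h : pvLex kzl i j) : ¬ pvLex kzl j i := by
  unfold pvLex at h ⊢
  rcases h with h | ⟨h1, h2⟩ <;> intro h' <;> rcases h' with h' | ⟨h1', h2'⟩ <;> omega

-- ---- stability of the insertion sort: pvS is pairwise pvLex ----

lemma pv_insertBy_pairwise (kzl : List Int) :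
    ∀ (acc : List Nat) (x : Nat), acc.Pairwise (pvLex kzl) → (∀ y ∈ acc, y < x) →
      (PySem.List.insertBy (fun a b => decide (kzl.getD a 0 < kzl.getD b 0)) x acc).Pairwise
        (pvLex kzl) := by
  intro acc
  induction acc with
  | nil =>
    intro x _ _
    exact List.pairwise_singleton _ x
  | cons y ys ih =>
    intro x hp hlt
    rw [List.pairwise_cons] at hp
    show (if decide (kzl.getD x 0 < kzl.getD y 0) = true then x :: y :: ys
        else y :: PySem.List.insertBy _ x ys).Pairwise (pvLex kzl)
    by_cases hxy : kzl.getD x 0 < kzl.getD y 0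
    · rw [if_pos (by simpa using hxy)]
      refine List.pairwise_cons.mpr ⟨?_, List.pairwise_cons.mpr hp⟩
      intro z hz
      rcases List.mem_cons.mp hz with hz | hz
      · subst hz; exact Or.inl hxy
      · have hyz := hp.1 z hz
        unfold pvLex at hyz ⊢
        rcases hyz with h | ⟨h, _⟩
        · exact Or.inl (lt_trans hxy h)
        · exact Or.inl (by omega)
    · rw [if_neg (by simpa using hxy)]
      refine List.pairwise_cons.mpr
        ⟨?_, ih x hp.2 (fun z hz => hlt z (List.mem_cons_of_mem y hz))⟩
      intro z hz
      rcases (PySem.List.mem_insertBy _ _ _ _).mp hz with hz | hz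
      · rw [hz]
        have hyx : y < x := hlt y List.mem_cons_self
        rcases lt_or_eq_of_le (not_lt.mp hxy) with h | h
        · exact Or.inl h
        · exact Or.inr ⟨h, hyx⟩
      · exact hp.1 z hz

lemma pv_fold_insert_pairwise (kzl : List Int) :
    ∀ (xs acc : List Nat), acc.Pairwise (pvLex kzl) →
      (∀ y ∈ acc, ∀ x ∈ xs, y < x) → xs.Pairwise (· < ·) →
      ((xs.foldl
          (fun a x =>
            PySem.List.insertBy (fun a b => decide (kzl.getD a 0 < kzl.getD b 0)) x a)
          acc)).Pairwise (pvLex kzl) := by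
  intro xs
  induction xs with
  | nil => intro acc hp _ _; exact hp
  | cons x t ih =>
    intro acc hp hlt hxs
    rw [List.pairwise_cons] at hxs
    rw [List.foldl_cons]
    apply ih
    · exact pv_insertBy_pairwise kzl acc x hp (fun y hy => hlt y hy x List.mem_cons_self)
    · intro y hy z hz
      rcases (PySem.List.mem_insertBy _ _ _ _).mp hy with hy | hy
      · subst hy; exact hxs.1 z hz
      · exact hlt y hy z (List.mem_cons_of_mem x hz)
    · exact hxs.2

lemma pvS_pairwise (kzl : List Int) : (pvS kzl).Pairwise (pvLex kzl) := by
  have h := PySem.List.sorted_eq_foldl_insertBy (List.range kzl.length)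
    (fun k => kzl.getD k 0)
  unfold pvS
  rw [h]
  exact pv_fold_insert_pairwise kzl (List.range kzl.length) [] List.Pairwise.nil
    (by intro y hy; simp at hy) List.pairwise_lt_range

-- ---- rank characterization: pvRankN inverts pvS ----

lemma pvS_length (kzl : List Int) : (pvS kzl).length = kzl.length := by
  unfold pvS
  rw [PySem.List.length_sorted, List.length_range]

lemma pvS_perm (kzl : List Int) : (pvS kzl).Perm (List.range kzl.length) :=
  PySem.List.sorted_perm _ _ _

lemma pv_rank_getElem (kzl : List Int) (r : Nat) (hr : r < (pvS kzl).length) :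
    pvRankN kzl ((pvS kzl)[r]) = r := by
  have hperm := pvS_perm kzl
  have hpw := pvS_pairwise kzl
  rw [List.pairwise_iff_getElem] at hpw
  unfold pvRankN
  rw [← hperm.countP_eq]
  generalize hx : (pvS kzl)[r] = x
  have hsplit : pvS kzl = (pvS kzl).take r ++ (pvS kzl).drop r :=
    (List.take_append_drop r (pvS kzl)).symm
  conv_lhs => rw [hsplit]
  rw [List.countP_append]
  have hlen : ((pvS kzl).take r).length = r := by
    rw [List.length_take]; omega
  have h1 : ((pvS kzl).take r).countP (fun i => pvLexB kzl i x) =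
      ((pvS kzl).take r).length := by
    rw [List.countP_eq_length]
    intro y hy
    rcases List.mem_iff_getElem.mp hy with ⟨p, hp, hpy⟩
    have hpr : p < r := by rw [hlen] at hp; exact hp
    rw [List.getElem_take] at hpy
    subst hpy
    rw [← hx]
    exact (pvLexB_iff kzl _ _).mpr (hpw p r (by omega) hr hpr)
  have h2 : ((pvS kzl).drop r).countP (fun i => pvLexB kzl i x) = 0 := by
    rw [List.countP_eq_zero]
    intro y hy
    rcases List.mem_iff_getElem.mp hy with ⟨p, hp, hpy⟩
    rw [List.getElem_drop] at hpy
    subst hpy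
    rw [List.length_drop] at hp
    rw [← hx]
    rcases Nat.eq_zero_or_pos p with hp0 | hp0
    · subst hp0
      simp only [Nat.add_zero]
      intro hc
      exact pvLex_irrefl kzl _ ((pvLexB_iff kzl _ _).mp hc)
    · intro hc
      exact pvLex_asymm kzl _ _ (hpw r (r + p) hr (by omega) (by omega))
        ((pvLexB_iff kzl _ _).mp hc)
  rw [h1, h2, hlen]
  omega

lemma pv_rank_inverse (kzl : List Int) (j : Nat) (hj : j < kzl.length) :
    pvRankN kzl j < kzl.length ∧ (pvS kzl).getD (pvRankN kzl j) 0 = j := by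
  have hjmem : j ∈ pvS kzl := by
    rw [(pvS_perm kzl).mem_iff]
    exact List.mem_range.mpr hj
  rcases List.mem_iff_getElem.mp hjmem with ⟨r, hr, hrj⟩
  have hrank : pvRankN kzl j = r := by rw [← hrj]; exact pv_rank_getElem kzl r hr
  refine ⟨by rw [hrank, ← pvS_length kzl]; exact hr, ?_⟩
  rw [hrank, List.getD_eq_getElem _ _ hr, hrj]

lemma pvS_getD_lt (kzl : List Int) (r : Nat) (hr : r < kzl.length) :
    (pvS kzl).getD r 0 < kzl.length := by
  have hr' : r < (pvS kzl).length := by rw [pvS_length]; exact hr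
  rw [List.getD_eq_getElem _ _ hr']
  have := (pvS_perm kzl).mem_iff.mp (List.getElem_mem hr')
  exact List.mem_range.mp this

lemma pv_rank_of_getD (kzl : List Int) (i : Nat) (hi : i < kzl.length) :
    pvRankN kzl ((pvS kzl).getD i 0) = i := by
  have hi' : i < (pvS kzl).length := by rw [pvS_length]; exact hi
  rw [List.getD_eq_getElem _ _ hi']
  exact pv_rank_getElem kzl i hi'

-- ---- generic list-update lemmas ----

lemma pv_set_oob {α : Type} : ∀ (l : List α) (i : Nat) (a : α), l.length ≤ i → l.set i a = l := by
  intro l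
  induction l with
  | nil => intro i a _; rfl
  | cons x t ih =>
    intro i a h
    cases i with
    | zero => exact absurd h (by simp)
    | succ i =>
      rw [List.set_cons_succ, ih i a (by simp only [List.length_cons] at h; omega)]

lemma pv_getD_set_self {α : Type} (a d : α) :
    ∀ (l : List α) (i : Nat), i < l.length → (l.set i a).getD i d = a := by
  intro l
  induction l with
  | nil => intro i h; simp at h
  | cons x t ih =>
    intro i h
    cases i with
    | zero => rfl
    | succ i =>
      rw [List.set_cons_succ, List.getD_cons_succ]
      exact ih i (by simp only [List.length_cons] at h; omega)

lemma pv_getD_set_ne {α : Type} (a d : α) :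
    ∀ (l : List α) (i j : Nat), i ≠ j → (l.set i a).getD j d = l.getD j d := by
  intro l
  induction l with
  | nil => intro i j _; rfl
  | cons x t ih =>
    intro i j hij
    cases i with
    | zero =>
      cases j with
      | zero => exact absurd rfl hij
      | succ j => rfl
    | succ i =>
      cases j with
      | zero => rfl
      | succ j =>
        rw [List.set_cons_succ, List.getD_cons_succ, List.getD_cons_succ]
        exact ih i j (by omega)

lemma pv_getD_map_range {α : Type} (h : Nat → α) (d : α) (n j : Nat) (hj : j < n) :
    ((List.range n).map h).getD j d = h j := by
  have hj' : j < ((List.range n).map h).length := by simp [hj]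
  rw [List.getD_eq_getElem _ _ hj']
  simp

lemma pv_foldl_congr {α β : Type} :
    ∀ (l : List α) (f g : β → α → β) (init : β),
      (∀ acc x, x ∈ l → f acc x = g acc x) → l.foldl f init = l.foldl g init := by
  intro l
  induction l with
  | nil => intro f g init _; rfl
  | cons x t ih =>
    intro f g init h
    rw [List.foldl_cons, List.foldl_cons, h init x List.mem_cons_self]
    exact ih f g _ (fun acc y hy => h acc y (List.mem_cons_of_mem x hy))

-- result of a batch of `l[pos] = val` updates at an update's position
lemma pv_foldl_set_notmem {α : Type} :
    ∀ (us : List (Nat × α)) (init : List α) (p : Nat) (d : α),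
      p ∉ us.map Prod.fst →
      (us.foldl (fun l u => l.set u.1 u.2) init).getD p d = init.getD p d := by
  intro us
  induction us with
  | nil => intro init p d _; rfl
  | cons u t ih =>
    intro init p d hp
    simp only [List.map_cons, List.mem_cons, not_or] at hp
    simp only [List.foldl_cons]
    rw [ih (init.set u.1 u.2) p d hp.2]
    exact pv_getD_set_ne u.2 d init u.1 p (fun h => hp.1 h.symm)

lemma pv_foldl_set_mem {α : Type} :
    ∀ (us : List (Nat × α)) (init : List α) (k : Nat) (d : α) (w : Nat × α),
      k < us.length → (us.map Prod.fst).Nodup → (us.getD k w).1 < init.length →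
      (us.foldl (fun l u => l.set u.1 u.2) init).getD ((us.getD k w).1) d = (us.getD k w).2 := by
  intro us
  induction us with
  | nil => intro init k d w hk _ _; simp at hk
  | cons u t ih =>
    intro init k d w hk hnd hlt
    simp only [List.map_cons, List.nodup_cons] at hnd
    cases k with
    | zero =>
      simp only [List.getD_cons_zero] at hlt ⊢
      simp only [List.foldl_cons]
      rw [pv_foldl_set_notmem t (init.set u.1 u.2) u.1 d hnd.1]
      exact pv_getD_set_self u.2 d init u.1 hlt
    | succ k =>
      simp only [List.getD_cons_succ] at hlt ⊢
      simp only [List.foldl_cons]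
      exact ih (init.set u.1 u.2) k d w (by simp only [List.length_cons] at hk; omega) hnd.2
        (by simpa using hlt)

-- B's inv array agrees with the sorted index list
lemma pv_inv_getD (kzl : List Int) (r : Nat) (hr : r < kzl.length) :
    ((List.range kzl.length).foldl
        (fun p j => p.set (((List.range kzl.length).map (pvRankN kzl)).getD j 0) j)
        (List.replicate kzl.length 0)).getD r 0 = (pvS kzl).getD r 0 := by
  have hcongr : (List.range kzl.length).foldl
      (fun p j => p.set (((List.range kzl.length).map (pvRankN kzl)).getD j 0) j)
      (List.replicate kzl.length 0)
      = (List.range kzl.length).foldl (fun p j => p.set (pvRankN kzl j) j)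
          (List.replicate kzl.length 0) := by
    apply pv_foldl_congr
    intro acc j hj
    rw [pv_getD_map_range _ _ _ _ (List.mem_range.mp hj)]
  rw [hcongr]
  have hfold : (List.range kzl.length).foldl (fun p j => p.set (pvRankN kzl j) j)
      (List.replicate kzl.length 0)
      = ((List.range kzl.length).map (fun j => (pvRankN kzl j, j))).foldl
          (fun l u => l.set u.1 u.2) (List.replicate kzl.length 0) := by
    rw [List.foldl_map]
  rw [hfold]
  set us := (List.range kzl.length).map (fun j => (pvRankN kzl j, j)) with hus
  have huslen : us.length = kzl.length := by simp [hus]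
  have husget : ∀ k, k < kzl.length → us.getD k (0, 0) = (pvRankN kzl k, k) := by
    intro k hk
    rw [hus]
    exact pv_getD_map_range _ _ _ _ hk
  have hnd : (us.map Prod.fst).Nodup := by
    rw [hus, List.map_map]
    have : (Prod.fst ∘ fun j => (pvRankN kzl j, j)) = pvRankN kzl := rfl
    rw [this]
    apply List.Nodup.map_on ?_ List.nodup_range
    intro x hx y hy hxy
    have hx' := (pv_rank_inverse kzl x (List.mem_range.mp hx)).2
    have hy' := (pv_rank_inverse kzl y (List.mem_range.mp hy)).2
    rw [← hx', ← hy', hxy]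
  -- the index of rank r
  set j0 := (pvS kzl).getD r 0 with hj0
  have hj0lt : j0 < kzl.length := pvS_getD_lt kzl r hr
  have hrankj0 : pvRankN kzl j0 = r := pv_rank_of_getD kzl r hr
  have h := pv_foldl_set_mem us (List.replicate kzl.length 0) j0 0 (0, 0)
    (by rw [huslen]; exact hj0lt) hnd
    (by rw [husget j0 hj0lt]; simp only [hrankj0]; simp [hr])
  rw [husget j0 hj0lt] at h
  simp only [hrankj0] at h
  exact h

-- ---- shape and entries of pvSetE and of A's write loop ----

lemma pv_setE_shape (n : Nat) (m : List (List Int)) (r c : Nat) (h : pvShape n m) :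
    pvShape n (pvSetE m r c) := by
  obtain ⟨h1, h2⟩ := h
  by_cases hr : r < m.length
  · refine ⟨by simp [pvSetE, h1], ?_⟩
    intro row hrow
    rcases List.mem_or_eq_of_mem_set hrow with hrow | hrow
    · exact h2 row hrow
    · rw [hrow, List.length_set, List.getD_eq_getElem _ _ hr]
      exact h2 _ (List.getElem_mem hr)
  · unfold pvSetE
    rw [pv_set_oob m r _ (by omega)]
    exact ⟨h1, h2⟩

lemma pv_get_setE (n : Nat) (m : List (List Int)) (r c a b : Nat) (h : pvShape n m)
    (ha : a < n) (hb : b < n) :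
    pvGet (pvSetE m r c) a b = if a = r ∧ b = c then 1 else pvGet m a b := by
  obtain ⟨h1, h2⟩ := h
  by_cases har : a = r
  · subst har
    have halt : a < m.length := by omega
    have hrow : (m.getD a []).length = n := by
      rw [List.getD_eq_getElem _ _ halt]
      exact h2 _ (List.getElem_mem halt)
    unfold pvGet pvSetE
    rw [pv_getD_set_self _ _ m a halt]
    by_cases hbc : b = c
    · subst hbc
      rw [if_pos ⟨rfl, rfl⟩]
      exact pv_getD_set_self _ _ _ b (by omega)
    · rw [if_neg (fun hh => hbc hh.2)]
      exact pv_getD_set_ne _ _ _ c b (fun hh => hbc hh.symm)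
  · rw [if_neg (fun hh => har hh.1)]
    unfold pvGet pvSetE
    rw [pv_getD_set_ne _ _ m r a (fun hh => har hh.symm)]

lemma pv_foldA_shape (n : Nat) :
    ∀ (ps : List (Nat × Nat)) (m : List (List Int)), pvShape n m →
      pvShape n (ps.foldl (fun m p => pvSetE (pvSetE m p.1 p.2) p.2 p.1) m) := by
  intro ps
  induction ps with
  | nil => intro m hm; exact hm
  | cons p t ih =>
    intro m hm
    rw [List.foldl_cons]
    exact ih _ (pv_setE_shape n _ p.2 p.1 (pv_setE_shape n m p.1 p.2 hm))

-- A's loop `for pair in pairs: rmat[pair[0]][pair[1]] = 1; rmat[pair[1]][pair[0]] = 1`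
lemma pv_entryA (n : Nat) :
    ∀ (ps : List (Nat × Nat)) (m : List (List Int)), pvShape n m → ∀ (a b : Nat),
      a < n → b < n →
      pvGet (ps.foldl (fun m p => pvSetE (pvSetE m p.1 p.2) p.2 p.1) m) a b
        = if (∃ p ∈ ps, (a, b) = p ∨ (a, b) = (p.2, p.1)) then 1 else pvGet m a b := by
  intro ps
  induction ps with
  | nil =>
    intro m hm a b ha hb
    simp
  | cons p t ih =>
    intro m hm a b ha hb
    obtain ⟨p1, p2⟩ := p
    rw [List.foldl_cons,
        ih _ (pv_setE_shape n _ p2 p1 (pv_setE_shape n m p1 p2 hm)) a b ha hb]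
    by_cases ht : ∃ q ∈ t, (a, b) = q ∨ (a, b) = (q.2, q.1)
    · have hex : ∃ q ∈ (p1, p2) :: t, (a, b) = q ∨ (a, b) = (q.2, q.1) := by
        rcases ht with ⟨q, hq, hq'⟩
        exact ⟨q, List.mem_cons_of_mem _ hq, hq'⟩
      rw [if_pos ht, if_pos hex]
    · rw [if_neg ht,
          pv_get_setE n _ p2 p1 a b (pv_setE_shape n m p1 p2 hm) ha hb,
          pv_get_setE n m p1 p2 a b hm ha hb]
      by_cases hp : (a, b) = (p1, p2) ∨ (a, b) = (p2, p1)
      · have hex : ∃ q ∈ (p1, p2) :: t, (a, b) = q ∨ (a, b) = (q.2, q.1) :=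
          ⟨(p1, p2), List.mem_cons_self, hp⟩
        rw [if_pos hex]
        rcases hp with hp | hp
        · have ha1 : a = p1 := congrArg Prod.fst hp
          have hb2 : b = p2 := congrArg Prod.snd hp
          by_cases h21 : a = p2 ∧ b = p1
          · rw [if_pos h21]
          · rw [if_neg h21, if_pos ⟨ha1, hb2⟩]
        · have hab : a = p2 ∧ b = p1 := ⟨congrArg Prod.fst hp, congrArg Prod.snd hp⟩
          rw [if_pos hab]
      · have hnex : ¬ ∃ q ∈ (p1, p2) :: t, (a, b) = q ∨ (a, b) = (q.2, q.1) := by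
          intro hc
          rcases hc with ⟨q, hq, hq'⟩
          rcases List.mem_cons.mp hq with hq | hq
          · exact hp (by rw [hq] at hq'; exact hq')
          · exact ht ⟨q, hq, hq'⟩
        have h21 : ¬(a = p2 ∧ b = p1) := fun hc => hp (Or.inr (by rw [hc.1, hc.2]))
        have h12 : ¬(a = p1 ∧ b = p2) := fun hc => hp (Or.inl (by rw [hc.1, hc.2]))
        rw [if_neg hnex, if_neg h21, if_neg h12]

-- membership in A's pairs list, characterized through the rank function
lemma pv_pairs_mem (kzl : List Int) (a b : Nat) (ha : a < kzl.length) (_hb : b < kzl.length) :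
    (∃ p ∈ (if kzl.length % 2 = 1 then
        ((List.range (kzl.length / 2)).map
          (fun i => ((pvS kzl).getD i 0, (pvS kzl).getD (kzl.length - 1 - i) 0))) ++
          [((pvS kzl).getD (kzl.length / 2) 0, (pvS kzl).getD (kzl.length / 2) 0)]
      else ((List.range (kzl.length / 2)).map
          (fun i => ((pvS kzl).getD i 0, (pvS kzl).getD (kzl.length - 1 - i) 0)))),
        (a, b) = p ∨ (a, b) = (p.2, p.1))
    ↔ b = (pvS kzl).getD (kzl.length - 1 - pvRankN kzl a) 0 := by
  set n := kzl.length with hn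
  set s := pvS kzl with hs
  -- first: pairs-membership ↔ ∃ i < n, a = s[i] ∧ b = s[n-1-i]
  have hC : (∃ p ∈ (if n % 2 = 1 then
        ((List.range (n / 2)).map (fun i => (s.getD i 0, s.getD (n - 1 - i) 0))) ++
          [(s.getD (n / 2) 0, s.getD (n / 2) 0)]
      else ((List.range (n / 2)).map (fun i => (s.getD i 0, s.getD (n - 1 - i) 0)))),
        (a, b) = p ∨ (a, b) = (p.2, p.1))
      ↔ ∃ i, i < n ∧ a = s.getD i 0 ∧ b = s.getD (n - 1 - i) 0 := by
    constructor
    · rintro ⟨p, hp, hp'⟩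
      have hbase : p ∈ (List.range (n / 2)).map
            (fun i => (s.getD i 0, s.getD (n - 1 - i) 0)) ∨
          (n % 2 = 1 ∧ p = (s.getD (n / 2) 0, s.getD (n / 2) 0)) := by
        by_cases hodd : n % 2 = 1
        · rw [if_pos hodd] at hp
          rcases List.mem_append.mp hp with hp | hp
          · exact Or.inl hp
          · exact Or.inr ⟨hodd, List.mem_singleton.mp hp⟩
        · rw [if_neg hodd] at hp
          exact Or.inl hp
      rcases hbase with hp2 | ⟨hodd, hp2⟩
      · rcases List.mem_map.mp hp2 with ⟨i, hi, hip⟩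
        have hi' : i < n / 2 := List.mem_range.mp hi
        rcases hp' with hp' | hp'
        · refine ⟨i, by omega, ?_, ?_⟩
          · rw [← hip] at hp'; exact congrArg Prod.fst hp'
          · rw [← hip] at hp'; exact congrArg Prod.snd hp'
        · refine ⟨n - 1 - i, by omega, ?_, ?_⟩
          · rw [← hip] at hp'; exact congrArg Prod.fst hp'
          · rw [← hip] at hp'
            have : n - 1 - (n - 1 - i) = i := by omega
            rw [this]
            exact congrArg Prod.snd hp'
      · subst hp2
        refine ⟨n / 2, by omega, ?_, ?_⟩
        · rcases hp' with hp' | hp' <;> exact congrArg Prod.fst hp'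
        · have : n - 1 - n / 2 = n / 2 := by omega
          rw [this]
          rcases hp' with hp' | hp' <;> exact congrArg Prod.snd hp'
    · rintro ⟨i, hi, hia, hib⟩
      by_cases hilo : i < n / 2
      · refine ⟨(s.getD i 0, s.getD (n - 1 - i) 0), ?_, Or.inl (by rw [hia, hib])⟩
        have hmem : (s.getD i 0, s.getD (n - 1 - i) 0) ∈
            (List.range (n / 2)).map (fun i => (s.getD i 0, s.getD (n - 1 - i) 0)) :=
          List.mem_map.mpr ⟨i, List.mem_range.mpr hilo, rfl⟩
        by_cases hodd : n % 2 = 1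
        · rw [if_pos hodd]; exact List.mem_append_left _ hmem
        · rw [if_neg hodd]; exact hmem
      · by_cases hmid : n % 2 = 1 ∧ i = n / 2
        · refine ⟨(s.getD (n / 2) 0, s.getD (n / 2) 0), ?_, ?_⟩
          · rw [if_pos hmid.1]
            exact List.mem_append_right _ (List.mem_singleton.mpr rfl)
          · have h1 : n - 1 - i = n / 2 := by omega
            exact Or.inl (by rw [hia, hib, h1, hmid.2])
        · -- i ≥ n/2 and not the odd middle: use the mirrored pair
          have hi' : n - 1 - i < n / 2 := by omega
          refine ⟨(s.getD (n - 1 - i) 0, s.getD (n - 1 - (n - 1 - i)) 0), ?_, ?_⟩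
          · have hmem : (s.getD (n - 1 - i) 0, s.getD (n - 1 - (n - 1 - i)) 0) ∈
                (List.range (n / 2)).map (fun i => (s.getD i 0, s.getD (n - 1 - i) 0)) :=
              List.mem_map.mpr ⟨n - 1 - i, List.mem_range.mpr hi', rfl⟩
            by_cases hodd : n % 2 = 1
            · rw [if_pos hodd]; exact List.mem_append_left _ hmem
            · rw [if_neg hodd]; exact hmem
          · have h1 : n - 1 - (n - 1 - i) = i := by omega
            exact Or.inr (by rw [hia, hib, h1])
  rw [hC]
  constructor
  · rintro ⟨i, hi, hia, hib⟩
    have : pvRankN kzl a = i := by rw [hia, hs]; exact pv_rank_of_getD kzl i (by omega)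
    rw [this]
    exact hib
  · intro hb'
    have hrlt := (pv_rank_inverse kzl a (by omega)).1
    have hra := (pv_rank_inverse kzl a (by omega)).2
    exact ⟨pvRankN kzl a, by omega, by rw [← hs] at hra; exact hra.symm, hb'⟩

-- ---- final assembly ----

theorem pv_ab (kzl : List Int) : get_dfrmat kzl = get_dfrmat_alt kzl := by
  simp only [get_dfrmat, get_dfrmat_alt]
  set n := kzl.length with hn
  -- identify the port subterms with the proof abbreviations
  have hsrt : PySem.List.sorted (List.range n) (fun k => kzl.getD k 0) false = pvS kzl := rfl
  have hrk : (fun j => (List.range n).countP (fun i =>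
      decide (kzl.getD i 0 < kzl.getD j 0) ||
      (kzl.getD i 0 == kzl.getD j 0 && decide (i < j)))) = pvRankN kzl := rfl
  rw [hsrt, hrk]
  have hinit : pvShape n ((List.range n).map (fun _ => List.replicate n (0 : Int))) := by
    constructor
    · simp
    · intro row hrow
      rcases List.mem_map.mp hrow with ⟨_, _, hr⟩
      rw [← hr, List.length_replicate]
  have hinitget : ∀ a b, a < n → b < n →
      pvGet ((List.range n).map (fun _ => List.replicate n (0 : Int))) a b = 0 := by
    intro a b ha hb
    unfold pvGet
    rw [pv_getD_map_range _ _ _ _ ha]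
    have hb' : b < (List.replicate n (0 : Int)).length := by simp [hb]
    rw [List.getD_eq_getElem _ _ hb', List.getElem_replicate]
  set pairs := (if n % 2 = 1 then
      ((List.range (n / 2)).map
        (fun i => ((pvS kzl).getD i 0, (pvS kzl).getD (n - 1 - i) 0))) ++
        [((pvS kzl).getD (n / 2) 0, (pvS kzl).getD (n / 2) 0)]
    else ((List.range (n / 2)).map
        (fun i => ((pvS kzl).getD i 0, (pvS kzl).getD (n - 1 - i) 0)))) with hpairs
  have hshapeA := pv_foldA_shape n pairs _ hinit
  apply List.ext_getElem
  · rw [hshapeA.1]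
    simp
  · intro a h1 h2
    have ha : a < n := by rw [← hshapeA.1]; exact h1
    have hrowB : ((List.range n).map (fun j => (List.range n).map (fun c =>
        if c = ((List.range n).foldl
            (fun p j => p.set (((List.range n).map (pvRankN kzl)).getD j 0) j)
            (List.replicate n 0)).getD
              (n - 1 - ((List.range n).map (pvRankN kzl)).getD j 0) 0
          then (1 : Int) else 0)))[a]
        = (List.range n).map (fun c =>
          if c = ((List.range n).foldl
              (fun p j => p.set (((List.range n).map (pvRankN kzl)).getD j 0) j)
              (List.replicate n 0)).getD
                (n - 1 - ((List.range n).map (pvRankN kzl)).getD a 0) 0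
            then (1 : Int) else 0) := by
      rw [List.getElem_map]
      congr 1
      simp
    rw [hrowB]
    have hrowA : (pairs.foldl (fun m p => pvSetE (pvSetE m p.1 p.2) p.2 p.1)
          ((List.range n).map (fun _ => List.replicate n (0 : Int))))[a].length = n := by
      exact hshapeA.2 _ (List.getElem_mem h1)
    apply List.ext_getElem
    · rw [hrowA]; simp
    · intro b hb1 hb2
      have hbn : b < n := by rw [← hrowA]; exact hb1
      -- left entry via pvGet
      have hgetA : (pairs.foldl (fun m p => pvSetE (pvSetE m p.1 p.2) p.2 p.1)
            ((List.range n).map (fun _ => List.replicate n (0 : Int))))[a][b]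
          = pvGet (pairs.foldl (fun m p => pvSetE (pvSetE m p.1 p.2) p.2 p.1)
            ((List.range n).map (fun _ => List.replicate n (0 : Int)))) a b := by
        unfold pvGet
        rw [List.getD_eq_getElem _ _ h1, List.getD_eq_getElem _ _ hb1]
      rw [hgetA, pv_entryA n pairs _ hinit a b ha hbn, hinitget a b ha hbn]
      -- right entry
      have hgetB : ((List.range n).map (fun c =>
          if c = ((List.range n).foldl
              (fun p j => p.set (((List.range n).map (pvRankN kzl)).getD j 0) j)
              (List.replicate n 0)).getD
                (n - 1 - ((List.range n).map (pvRankN kzl)).getD a 0) 0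
            then (1 : Int) else 0))[b]
          = (if b = ((List.range n).foldl
              (fun p j => p.set (((List.range n).map (pvRankN kzl)).getD j 0) j)
              (List.replicate n 0)).getD
                (n - 1 - ((List.range n).map (pvRankN kzl)).getD a 0) 0
            then (1 : Int) else 0) := by
        rw [List.getElem_map]
        congr 1
        simp
      rw [hgetB]
      -- rewrite B's index expressions
      rw [pv_getD_map_range (pvRankN kzl) 0 n a ha]
      have hidx : n - 1 - pvRankN kzl a < n := by
        have := (pv_rank_inverse kzl a ha).1
        omega
      rw [pv_inv_getD kzl _ hidx]
      -- compare the two indicators through the pairs-membership characterization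
      rw [hpairs]
      by_cases hcond : b = (pvS kzl).getD (n - 1 - pvRankN kzl a) 0
      · rw [if_pos ((pv_pairs_mem kzl a b ha hbn).mpr hcond), if_pos hcond]
      · rw [if_neg (fun hc => hcond ((pv_pairs_mem kzl a b ha hbn).mp hc)),
            if_neg hcond]

-- ===== VERDICT (by name: the statement is the Claim_ definition above) =====
theorem get_dfrmat_spec : Claim_equal_get_dfrmat := by
  intro kzl _
  unfold Spec_get_dfrmat
  exact pv_ab kzl
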